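-- pv_equiv track=rewrite | github.com/cmaraziaris/ctf-csec-uoa-2021 | steps/pico-master/attack_files/process_answer.py | substitute_null_bytes
-- ===== SOURCE A (Python) =====
-- def substitute_null_bytes(word):
--     dangerous = []
--     prev = '1'
--     for i in range(0, len(word)):
--         if i % 2 == 1 and word[i] == '0' and prev == '0':
--             dangerous.append( i-1 )
--             prev = '1'
--         else:
--             prev = word[i]
--
--
--     neww = list(word)
--     for i in dangerous:
--         neww[i] = '2'
--         neww[i+1] = '6'  # 0x26 == '&'
--
--     s = ''
--     for i in neww:
--         s += i
--     return s
-- ===== SOURCE B (Python) =====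
-- def substitute_null_bytes(word):
--     chunks = []
--     for i in range(0, len(word) - 1, 2):
--         if word[i] == '0' and word[i+1] == '0':
--             chunks.append('26')
--         else:
--             chunks.append(word[i:i+2])
--     if len(word) % 2 == 1:
--         chunks.append(word[-1])
--     return ''.join(chunks)
-- ===== Notes on version B (the rewrite author's own statement) =====
-- stated objective: simpler
-- what changed: Replaces A's three passes (stateful prev-tracking scan collecting indices, then in-place mutation of a char list, then char-by-char string rebuild) with a single aligned two-chars-at-a-time chunking loop joined once at the end.
import Mathlib
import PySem

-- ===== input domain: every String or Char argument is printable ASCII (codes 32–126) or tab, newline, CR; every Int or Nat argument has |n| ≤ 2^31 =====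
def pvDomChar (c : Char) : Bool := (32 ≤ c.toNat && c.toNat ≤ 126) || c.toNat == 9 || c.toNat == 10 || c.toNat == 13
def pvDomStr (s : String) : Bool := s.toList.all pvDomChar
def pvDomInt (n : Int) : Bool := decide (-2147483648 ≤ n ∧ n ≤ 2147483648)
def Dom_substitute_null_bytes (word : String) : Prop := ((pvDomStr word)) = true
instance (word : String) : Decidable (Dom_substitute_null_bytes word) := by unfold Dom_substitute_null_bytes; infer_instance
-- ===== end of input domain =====

-- B replaces A's three passes (index-collecting scan with a `prev` flag, in-place
-- mutation of a char list, char-by-char rebuild) by one aligned pairwise chunking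
-- loop joined at the end; objective: simpler.

-- ===== PORT A =====
-- first loop: for i in range(len(word)): track prev, collect dangerous indices
def pvALoop1 (rest : List Char) (i : Nat) (prev : Char) (dangerous : List Nat) : List Nat :=
  match rest with
  | [] => dangerous
  | c :: rs =>
    if i % 2 == 1 && c == '0' && prev == '0' then
      pvALoop1 rs (i + 1) '1' (dangerous ++ [i - 1])
    else
      pvALoop1 rs (i + 1) c dangerous

def substitute_null_bytes (word : String) : String :=
  let dangerous := pvALoop1 word.toList 0 '1' []
  let neww := dangerous.foldl (fun l i => (l.set i '2').set (i + 1) '6') word.toList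
  neww.foldl (fun s c => s.push c) ""

-- ===== PORT B =====
-- chunks built two characters at a time, then joined
def pvBChunks : List Char → List String
  | a :: b :: rs =>
    (if a == '0' && b == '0' then "26" else String.ofList [a, b]) :: pvBChunks rs
  | [a] => [String.ofList [a]]
  | [] => []

def substitute_null_bytes_alt (word : String) : String :=
  String.join (pvBChunks word.toList)

-- ===== PRECONDITION & SPEC =====
def Spec_substitute_null_bytes (word : String) (out : String) : Prop := out = substitute_null_bytes_alt word
instance (word : String) (out : String) : Decidable (Spec_substitute_null_bytes word out) := by unfold Spec_substitute_null_bytes; infer_instance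

-- ===== CLAIM (what is proved, stated in full; the proofs are below) =====
def Claim_equal_substitute_null_bytes : Prop := ∀ (word : String), Dom_substitute_null_bytes word → Spec_substitute_null_bytes word (substitute_null_bytes word)

-- ===== LEMMAS AND PROOFS =====

-- pure pairwise substitution on a char list (reference form both ports reduce to)
def pvPairSub : List Char → List Char
  | a :: b :: rs => (if a == '0' && b == '0' then ['2', '6'] else [a, b]) ++ pvPairSub rs
  | [a] => [a]
  | [] => []

-- pairwise list of dangerous indices, starting at even offset n
def pvDanger : List Char → Nat → List Nat
  | a :: b :: rs, n => (if a == '0' && b == '0' then [n] else []) ++ pvDanger rs (n + 2)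
  | [_], _ => []
  | [], _ => []

theorem pvALoop1_eq_danger (cs : List Char) : ∀ (n : Nat), n % 2 = 0 → ∀ (prev : Char) (d : List Nat),
    pvALoop1 cs n prev d = d ++ pvDanger cs n := by
  induction cs using pvPairSub.induct with
  | case1 a b rs ih =>
    intro n hn prev d
    have hodd : (n + 1) % 2 = 1 := by omega
    have heven : (n + 2) % 2 = 0 := by omega
    simp only [pvALoop1, pvDanger, hn, hodd]
    simp only [show (0 == 1) = false from rfl, show (1 == 1) = true from rfl,
      Bool.false_and, Bool.true_and, Bool.false_eq_true, if_false, Nat.add_sub_cancel]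
    rw [Bool.and_comm (a == '0') (b == '0')]
    by_cases hb : (b == '0' && a == '0') = true
    · simp only [hb, if_pos]
      rw [show n + 1 + 1 = n + 2 from rfl, ih (n + 2) heven '1' (d ++ [n])]
      simp
    · simp only [Bool.eq_false_iff.mpr hb, Bool.false_eq_true, if_false]
      rw [show n + 1 + 1 = n + 2 from rfl, ih (n + 2) heven b d]
      simp
  | case2 a => intro n hn prev d; simp [pvALoop1, pvDanger, hn]
  | case3 => intro n hn prev d; simp [pvALoop1, pvDanger]

-- applying the set-mutations at the dangerous indices yields the pairwise substitution
theorem pvSets_eq_pairSub (cs : List Char) : ∀ (l : List Char),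
    (pvDanger cs l.length).foldl (fun t i => (t.set i '2').set (i + 1) '6') (l ++ cs)
      = l ++ pvPairSub cs := by
  induction cs using pvPairSub.induct with
  | case1 a b rs ih =>
    intro l
    simp only [pvDanger, pvPairSub]
    by_cases hb : (a == '0' && b == '0') = true
    · simp only [hb, if_pos, List.singleton_append, List.foldl_cons]
      have s1 : (l ++ a :: b :: rs).set l.length '2' = l ++ '2' :: b :: rs := by
        rw [List.set_append]; simp
      have s2 : (l ++ '2' :: b :: rs).set (l.length + 1) '6' = l ++ '2' :: '6' :: rs := by
        rw [List.set_append]; simp [List.set]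
      rw [s1, s2,
        show l ++ '2' :: '6' :: rs = (l ++ ['2', '6']) ++ rs by simp,
        show l.length + 2 = (l ++ ['2', '6']).length by simp,
        ih (l ++ ['2', '6'])]
      simp
    · have hb' : (a == '0' && b == '0') = false := by simpa using hb
      simp only [hb', List.nil_append, Bool.false_eq_true, if_false]
      rw [show l ++ a :: b :: rs = (l ++ [a, b]) ++ rs by simp,
        show l.length + 2 = (l ++ [a, b]).length by simp,
        ih (l ++ [a, b])]
      simp
  | case2 a => intro l; simp [pvDanger, pvPairSub]
  | case3 => intro l; simp [pvDanger, pvPairSub]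

theorem pvFoldPush (l : List Char) : ∀ (s : String),
    l.foldl (fun s c => s.push c) s = String.ofList (s.toList ++ l) := by
  induction l with
  | nil => intro s; simp
  | cons c rs ih => intro s; rw [List.foldl_cons, ih (s.push c)]; simp

theorem pvToListJoin (cs : List Char) : (String.join (pvBChunks cs)).toList = pvPairSub cs := by
  induction cs using pvPairSub.induct with
  | case1 a b rs ih =>
    simp only [pvBChunks, pvPairSub, String.toList_join, List.map_cons, List.flatten_cons]
    have hrs : ((pvBChunks rs).map String.toList).flatten = pvPairSub rs := by
      rw [← String.toList_join]; exact ih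
    rw [hrs]
    by_cases hb : (a == '0' && b == '0') = true
    · simp [hb]
    · simp [Bool.eq_false_iff.mpr hb]
  | case2 a => simp [pvBChunks, pvPairSub]
  | case3 => simp [pvBChunks, pvPairSub]

theorem pvJoin_eq (cs : List Char) : String.join (pvBChunks cs) = String.ofList (pvPairSub cs) := by
  rw [← pvToListJoin, String.ofList_toList]

-- ===== VERDICT (by name: the statement is the Claim_ definition above) =====
theorem substitute_null_bytes_spec : Claim_equal_substitute_null_bytes := by
  intro word _
  show List.foldl (fun s c => s.push c) ""
      (List.foldl (fun l i => (l.set i '2').set (i + 1) '6') word.toList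
        (pvALoop1 word.toList 0 '1' [])) = substitute_null_bytes_alt word
  rw [pvALoop1_eq_danger word.toList 0 rfl '1' [], List.nil_append]
  have h2 := pvSets_eq_pairSub word.toList []
  simp only [List.length_nil, List.nil_append] at h2
  rw [h2, pvFoldPush]
  unfold substitute_null_bytes_alt
  rw [pvJoin_eq]
  simp
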